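-- pv_equiv track=rewrite | github.com/toribiodiego/thesis | scripts/ram_discover.py | find_action
-- ===== SOURCE A (Python) =====
-- def find_action(meanings, target):
--     """Find the action index for a target direction name.
--
--     Prefers exact matches ('RIGHT') over compound matches
--     ('RIGHTFIRE'). Returns None if no match found.
--     """
--     for i, name in enumerate(meanings):
--         if name == target:
--             return i
--     for i, name in enumerate(meanings):
--         if name.startswith(target):
--             return i
--     return None
-- ===== SOURCE B (Python) =====
-- def find_action(meanings, target):
--     """One pass: return exact match immediately; remember first prefix candidate."""
--     prefix_i = None
--     for i, name in enumerate(meanings):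
--         if name == target:
--             return i
--         if prefix_i is None and name.startswith(target):
--             prefix_i = i
--     return prefix_i
-- ===== Notes on version B (the rewrite author's own statement) =====
-- stated objective: simpler
-- what changed: Replaces A's two separate scans (exact then prefix) with a single pass that returns on exact match and remembers the first prefix index in a variable.
import Mathlib
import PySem

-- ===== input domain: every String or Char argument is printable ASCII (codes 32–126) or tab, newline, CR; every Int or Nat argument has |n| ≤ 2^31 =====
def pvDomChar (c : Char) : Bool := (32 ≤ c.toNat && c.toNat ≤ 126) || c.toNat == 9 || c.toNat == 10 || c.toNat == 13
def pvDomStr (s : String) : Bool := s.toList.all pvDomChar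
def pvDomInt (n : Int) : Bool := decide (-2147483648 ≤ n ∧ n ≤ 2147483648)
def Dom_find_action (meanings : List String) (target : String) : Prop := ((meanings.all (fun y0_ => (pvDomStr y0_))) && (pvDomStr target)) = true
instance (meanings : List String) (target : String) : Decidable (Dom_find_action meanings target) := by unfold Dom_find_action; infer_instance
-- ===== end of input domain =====

-- B is a single pass that returns on exact match and remembers the first prefix index;
-- A makes two separate scans. Same value everywhere; objective: simpler.

-- ===== PORT A =====
-- A's first loop: return index of the first exact match
def find_action_eqScan (meanings : List String) (target : String) (i : Int) : Option Int :=
  match meanings with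
  | [] => none
  | name :: rest => if name = target then some i else find_action_eqScan rest target (i + 1)

-- A's second loop: return index of the first prefix match
def find_action_preScan (meanings : List String) (target : String) (i : Int) : Option Int :=
  match meanings with
  | [] => none
  | name :: rest =>
      if PySem.Str.startswith name target then some i
      else find_action_preScan rest target (i + 1)

def find_action (meanings : List String) (target : String) : Option Int :=
  match find_action_eqScan meanings target 0 with
  | some i => some i
  | none => find_action_preScan meanings target 0

-- ===== PORT B =====
-- single pass carrying the remembered first-prefix candidate
def find_action_alt_loop (meanings : List String) (target : String) (i : Int)
    (cand : Option Int) : Option Int :=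
  match meanings with
  | [] => cand
  | name :: rest =>
      if name = target then some i
      else if cand = none ∧ PySem.Str.startswith name target then
        find_action_alt_loop rest target (i + 1) (some i)
      else
        find_action_alt_loop rest target (i + 1) cand

def find_action_alt (meanings : List String) (target : String) : Option Int :=
  find_action_alt_loop meanings target 0 none

-- ===== PRECONDITION & SPEC =====
def Spec_find_action (meanings : List String) (target : String) (out : Option Int) : Prop := out = find_action_alt meanings target
instance (meanings : List String) (target : String) (out : Option Int) : Decidable (Spec_find_action meanings target out) := by unfold Spec_find_action; infer_instance

-- ===== CLAIM (what is proved, stated in full; the proofs are below) =====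
def Claim_equal_find_action : Prop := ∀ (meanings : List String) (target : String), Dom_find_action meanings target → Spec_find_action meanings target (find_action meanings target)

-- ===== LEMMAS AND PROOFS =====

-- B's loop computes: exact-scan result, else the earlier candidate, else the prefix-scan result.
theorem find_action_alt_loop_eq (meanings : List String) (target : String) (i : Int)
    (cand : Option Int) :
    find_action_alt_loop meanings target i cand =
      match find_action_eqScan meanings target i with
      | some j => some j
      | none =>
        match cand with
        | some c => some c
        | none => find_action_preScan meanings target i := by
  induction meanings generalizing i cand with
  | nil => cases cand <;> simp [find_action_alt_loop, find_action_eqScan, find_action_preScan]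
  | cons name rest ih =>
      by_cases he : name = target
      · simp [find_action_alt_loop, find_action_eqScan, he]
      · by_cases hp : PySem.Chars.startswith name.toList target.toList = true
        · cases cand with
          | none =>
              simp [find_action_alt_loop, find_action_eqScan, find_action_preScan,
                PySem.Str.startswith, he, hp, ih]
          | some c =>
              simp [find_action_alt_loop, find_action_eqScan, he, ih]
        · cases cand with
          | none =>
              simp [find_action_alt_loop, find_action_eqScan, find_action_preScan,
                PySem.Str.startswith, he, hp, ih]
          | some c =>
              simp [find_action_alt_loop, find_action_eqScan, he, ih]

-- ===== VERDICT (by name: the statement is the Claim_ definition above) =====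
theorem find_action_spec : Claim_equal_find_action := by
  intro meanings target _
  unfold Spec_find_action find_action find_action_alt
  rw [find_action_alt_loop_eq]
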